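-- pv_equiv track=rewrite | github.com/desecnd/ntru-py | src/ntru_py/poly/core.py | poly_sub_mod
-- ===== SOURCE A (Python) =====
-- def poly_sub_mod(a: list[int], b: list[int], m: int) -> list[int]:
--     """Subtract `b` from `a` modulo `m` with arbitrary polynomial degrees"""
--
--     if len(a) >= len(b):
--         c = [ x % m for x in a ]
--         for i in range(len(b)): c[i] = (c[i] - b[i]) % m
--     else:
--         # b is larger than a, but we have to negate it first
--         c = [ -x % m for x in b ]
--         for i in range(len(a)): c[i] = (c[i] + a[i]) % m
--
--     return c
-- ===== SOURCE B (Python) =====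
-- def poly_sub_mod(a: list[int], b: list[int], m: int) -> list[int]:
--     """Subtract `b` from `a` modulo `m` with arbitrary polynomial degrees"""
--     out = []
--     i = max(len(a), len(b))
--     while i > 0:
--         i -= 1
--         x = a[i] if i < len(a) else 0
--         y = b[i] if i < len(b) else 0
--         out.append((x - y) % m)
--     out.reverse()
--     return out
-- ===== Notes on version B (the rewrite author's own statement) =====
-- stated objective: alternative
-- what changed: Replaces A's branch on which list is longer plus copy-then-patch in-place loop by building the result back-to-front: a countdown while loop from the highest index appends (a[i]-b[i]) % m with guarded out-of-range reads treated as 0, followed by one reverse; there is no length dispatch, no intermediate copy of a or b, and no padding.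
import Mathlib
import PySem

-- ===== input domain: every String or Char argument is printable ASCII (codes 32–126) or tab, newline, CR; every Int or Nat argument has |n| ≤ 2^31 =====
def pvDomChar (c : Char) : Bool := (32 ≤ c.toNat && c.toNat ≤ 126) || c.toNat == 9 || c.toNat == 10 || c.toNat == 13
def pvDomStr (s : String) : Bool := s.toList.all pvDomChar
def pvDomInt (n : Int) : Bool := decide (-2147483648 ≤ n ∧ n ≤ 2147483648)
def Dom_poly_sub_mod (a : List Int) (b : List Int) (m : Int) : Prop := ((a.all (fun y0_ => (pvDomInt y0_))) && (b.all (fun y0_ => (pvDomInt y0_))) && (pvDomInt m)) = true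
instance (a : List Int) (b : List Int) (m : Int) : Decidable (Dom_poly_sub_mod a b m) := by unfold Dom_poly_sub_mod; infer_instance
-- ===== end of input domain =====

-- B builds the result back-to-front with a countdown loop over guarded index reads and
-- one final reverse, instead of A's longer/shorter dispatch with copy-then-patch (same cost).


-- ===== PORT A =====
def poly_sub_mod (a : List Int) (b : List Int) (m : Int) : List Int :=
  if a.length ≥ b.length then
    -- c = [ x % m for x in a ]; for i in range(len(b)): c[i] = (c[i] - b[i]) % m
    (PySem.List.pyRange 0 (b.length : Int) 1).foldl
      (fun c i => PySem.List.pySetD c i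
        (PySem.Int.mod (PySem.List.pyGetD c i 0 - PySem.List.pyGetD b i 0) m))
      (a.map (fun x => PySem.Int.mod x m))
  else
    -- c = [ -x % m for x in b ]; for i in range(len(a)): c[i] = (c[i] + a[i]) % m
    (PySem.List.pyRange 0 (a.length : Int) 1).foldl
      (fun c i => PySem.List.pySetD c i
        (PySem.Int.mod (PySem.List.pyGetD c i 0 + PySem.List.pyGetD a i 0) m))
      (b.map (fun x => PySem.Int.mod (-x) m))

-- ===== PORT B =====
-- the 'while i > 0: i -= 1; out.append((x - y) % m)' countdown loop of Source B
def polySubModRev (a : List Int) (b : List Int) (m : Int) : Nat → List Int → List Int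
  | 0, out => out
  | Nat.succ i, out =>
      polySubModRev a b m i
        (out ++ [PySem.Int.mod
          ((if i < a.length then a.getD i 0 else 0)
            - (if i < b.length then b.getD i 0 else 0)) m])

def poly_sub_mod_alt (a : List Int) (b : List Int) (m : Int) : List Int :=
  (polySubModRev a b m (max a.length b.length) []).reverse

-- ===== PRECONDITION & SPEC =====
-- Pre_ excludes exactly the inputs on which Python raises: '% m' with m = 0 is a
-- ZeroDivisionError whenever at least one coefficient exists (both lists empty returns []).
def Pre_poly_sub_mod (a : List Int) (b : List Int) (m : Int) : Prop :=
  m ≠ 0 ∨ (a = [] ∧ b = [])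
instance (a : List Int) (b : List Int) (m : Int) : Decidable (Pre_poly_sub_mod a b m) := by
  unfold Pre_poly_sub_mod; infer_instance
def pvWitness_poly_sub_mod : List Int × List Int × Int := ([1, 2], [3], 5)

def Spec_poly_sub_mod (a : List Int) (b : List Int) (m : Int) (out : List Int) : Prop := out = poly_sub_mod_alt a b m
instance (a : List Int) (b : List Int) (m : Int) (out : List Int) : Decidable (Spec_poly_sub_mod a b m out) := by unfold Spec_poly_sub_mod; infer_instance

-- ===== CLAIM (what is proved, stated in full; the proofs are below) =====
def Claim_equal_poly_sub_mod : Prop := ∀ (a : List Int) (b : List Int) (m : Int), Dom_poly_sub_mod a b m → Pre_poly_sub_mod a b m → Spec_poly_sub_mod a b m (poly_sub_mod a b m)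

-- ===== LEMMAS AND PROOFS =====

-- both programs' common normal form: the map over indices 0..max-1 with guarded reads
def pvIdxExpr (a b : List Int) (m : Int) : List Int :=
  (List.range (max a.length b.length)).map (fun i =>
    PySem.Int.mod
      ((if i < a.length then a.getD i 0 else 0)
        - (if i < b.length then b.getD i 0 else 0)) m)

-- the padded-zip normal form used to characterise A
def pvPadExpr (a b : List Int) (m : Int) : List Int :=
  ((a ++ List.replicate (max a.length b.length - a.length) (0 : Int)).zip
    (b ++ List.replicate (max a.length b.length - b.length) (0 : Int))).map
      (fun p => PySem.Int.mod (p.1 - p.2) m)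

-- Python's '%' is invariant under shifting the left operand by its own '% m'.
theorem pv_mod_shift (u v m : Int) :
    PySem.Int.mod (PySem.Int.mod u m + v) m = PySem.Int.mod (u + v) m := by
  simp only [PySem.Int.mod]
  have hu : u.fmod m = u - m * u.fdiv m := Int.fmod_def u m
  have h : u - m * u.fdiv m + v = (u + v) + (-(u.fdiv m)) * m := by ring
  rw [hu, h, Int.add_mul_fmod_self_right]

theorem pv_zipWith_take_left {α : Type} (f : α → α → α) :
    ∀ (c d : List α), List.zipWith f (c.take d.length) d = List.zipWith f c d := by
  intro c d
  induction c generalizing d with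
  | nil => simp
  | cons x c ih => cases d with
    | nil => simp
    | cons y d => simp [ih]

theorem pv_zipWith_take_right {α : Type} (f : α → α → α) :
    ∀ (c d : List α), List.zipWith f c (d.take c.length) = List.zipWith f c d := by
  intro c d
  induction c generalizing d with
  | nil => simp
  | cons x c ih => cases d with
    | nil => simp
    | cons y d => simp [ih]

-- mapping over a zip with a length-matched zero padding is a plain map
theorem pv_map_zip_replicate_right (g : Int × Int → Int) :
    ∀ (xs : List Int), ((xs.zip (List.replicate xs.length (0 : Int))).map g)
      = xs.map (fun x => g (x, 0)) := by
  intro xs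
  induction xs with
  | nil => rfl
  | cons x xs ih => simp [List.replicate_succ, ih]

theorem pv_map_zip_replicate_left (g : Int × Int → Int) :
    ∀ (xs : List Int), (((List.replicate xs.length (0 : Int)).zip xs).map g)
      = xs.map (fun x => g (0, x)) := by
  intro xs
  induction xs with
  | nil => rfl
  | cons x xs ih => simp [List.replicate_succ, ih]

theorem pv_map_zip_eq_zipWith {α : Type} (g : α × α → α) (l1 l2 : List α) :
    (l1.zip l2).map g = List.zipWith (fun x y => g (x, y)) l1 l2 := by
  simp [List.zip, List.map_zipWith]

-- A's patch loop 'for i in range(n): c[i] = f(c[i], d[i])' in closed form.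
theorem pv_patch_loop (f : Int → Int → Int) (d : List Int) :
    ∀ (n : Nat) (c : List Int), n ≤ d.length → n ≤ c.length →
    (PySem.List.pyRange 0 (n : Int) 1).foldl
      (fun c i => PySem.List.pySetD c i
        (f (PySem.List.pyGetD c i 0) (PySem.List.pyGetD d i 0))) c
    = List.zipWith f (c.take n) (d.take n) ++ c.drop n := by
  intro n
  induction n with
  | zero => intro c _ _; simp [PySem.List.pyRange_one_eq_nil]
  | succ n ih =>
    intro c hnd hnc
    have hc : n < c.length := by omega
    have hd : n < d.length := by omega
    have hcast : ((n + 1 : Nat) : Int) = (n : Int) + 1 := by push_cast; ring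
    rw [hcast, PySem.List.pyRange_one_succ_right (by positivity), List.foldl_append]
    rw [ih c (by omega) (by omega)]
    simp only [List.foldl_cons, List.foldl_nil]
    have hlen : (List.zipWith f (c.take n) (d.take n)).length = n := by
      simp; omega
    have hdropc : c.drop n = c.getD n 0 :: c.drop (n + 1) := by
      rw [List.drop_eq_getElem_cons hc]
      simp [List.getD, List.getElem?_eq_getElem hc]
    rw [PySem.List.pySetD_natCast, PySem.List.pyGetD_natCast, PySem.List.pyGetD_natCast]
    have hget : (List.zipWith f (c.take n) (d.take n) ++ c.drop n).getD n 0 = c.getD n 0 := by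
      rw [List.getD_append_right _ _ _ _ (by omega), hlen, Nat.sub_self, hdropc]
      rfl
    rw [hget]
    have hset : (List.zipWith f (c.take n) (d.take n) ++ c.drop n).set n
          (f (c.getD n 0) (d.getD n 0))
        = List.zipWith f (c.take n) (d.take n)
            ++ (f (c.getD n 0) (d.getD n 0) :: c.drop (n + 1)) := by
      rw [List.set_append_right _ _ (by omega), hlen, Nat.sub_self, hdropc]
      rfl
    rw [hset]
    have htc : c.take (n + 1) = c.take n ++ [c.getD n 0] := by
      rw [List.take_add_one, List.getElem?_eq_getElem hc]
      simp [List.getD, List.getElem?_eq_getElem hc]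
    have htd : d.take (n + 1) = d.take n ++ [d.getD n 0] := by
      rw [List.take_add_one, List.getElem?_eq_getElem hd]
      simp [List.getD, List.getElem?_eq_getElem hd]
    rw [htc, htd, List.zipWith_append (by simp; omega)]
    simp

-- A equals the padded-zip normal form (proof by the two branches of A).
theorem pv_A_eq_pad (a b : List Int) (m : Int) :
    poly_sub_mod a b m = pvPadExpr a b m := by
  unfold poly_sub_mod pvPadExpr
  by_cases hge : a.length ≥ b.length
  · rw [if_pos hge]
    have hmax : max a.length b.length = a.length := by omega
    rw [pv_patch_loop (fun x y => PySem.Int.mod (x - y) m) b b.length (a.map (fun x => PySem.Int.mod x m)) (le_refl _) (by simpa using hge)]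
    rw [hmax, Nat.sub_self, List.replicate_zero, List.append_nil]
    conv_rhs => rw [← List.take_append_drop b.length a]
    rw [List.zip_append (by simp; omega), List.map_append]
    have hlenpad : (a.drop b.length).length = a.length - b.length := by simp
    simp only [List.take_append_drop]
    rw [← hlenpad, pv_map_zip_replicate_right, pv_map_zip_eq_zipWith]
    have htail : (a.drop b.length).map (fun x => PySem.Int.mod (x - 0) m)
        = (a.map (fun x => PySem.Int.mod x m)).drop b.length := by
      simp [List.map_drop]
    rw [htail]
    congr 1
    rw [List.take_length,
      pv_zipWith_take_left (fun x y => PySem.Int.mod (x - y) m)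
        (a.map (fun x => PySem.Int.mod x m)) b,
      List.zipWith_map_left]
    rw [pv_zipWith_take_left (fun p q => PySem.Int.mod ((p, q).1 - (p, q).2) m) a b]
    have hfun : (fun x y => PySem.Int.mod (PySem.Int.mod x m - y) m)
        = (fun p q => PySem.Int.mod ((p, q).1 - (p, q).2) m) := by
      funext x y
      simpa [sub_eq_add_neg] using pv_mod_shift x (-y) m
    rw [hfun]
  · rw [if_neg hge]
    have hlt : a.length < b.length := by omega
    have hmax : max a.length b.length = b.length := by omega
    rw [pv_patch_loop (fun x y => PySem.Int.mod (x + y) m) a a.length (b.map (fun x => PySem.Int.mod (-x) m)) (le_refl _) (by simp; omega)]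
    rw [hmax, Nat.sub_self, List.replicate_zero, List.append_nil]
    conv_rhs => rw [← List.take_append_drop a.length b]
    rw [List.zip_append (by simp; omega), List.map_append]
    have hlenpad : (b.drop a.length).length = b.length - a.length := by simp
    simp only [List.take_append_drop]
    rw [← hlenpad, pv_map_zip_replicate_left, pv_map_zip_eq_zipWith]
    have htail : (b.drop a.length).map (fun x => PySem.Int.mod (0 - x) m)
        = (b.map (fun x => PySem.Int.mod (-x) m)).drop a.length := by
      simp [List.map_drop]
    rw [htail]
    congr 1
    rw [List.take_length,
      pv_zipWith_take_left (fun x y => PySem.Int.mod (x + y) m)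
        (b.map (fun x => PySem.Int.mod (-x) m)) a,
      List.zipWith_map_left, List.zipWith_comm]
    rw [pv_zipWith_take_right (fun p q => PySem.Int.mod ((p, q).1 - (p, q).2) m) a b]
    have hfun : (fun x y => PySem.Int.mod (PySem.Int.mod (-y) m + x) m)
        = (fun p q => PySem.Int.mod ((p, q).1 - (p, q).2) m) := by
      funext x y
      have h := pv_mod_shift (-y) x m
      have h2 : -y + x = x - y := by ring
      rw [h2] at h
      simpa using h
    rw [hfun]

-- the padded-zip form and the index-map form agree elementwise
theorem pv_pad_eq_idx (a b : List Int) (m : Int) :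
    pvPadExpr a b m = pvIdxExpr a b m := by
  unfold pvPadExpr pvIdxExpr
  apply List.ext_getElem
  · simp
  · intro i h1 h2
    have hi : i < max a.length b.length := by
      simp at h1; omega
    have hlen1 : i < (a ++ List.replicate (max a.length b.length - a.length) (0 : Int)).length := by
      simp; omega
    have hlen2 : i < (b ++ List.replicate (max a.length b.length - b.length) (0 : Int)).length := by
      simp; omega
    simp only [List.getElem_map, List.getElem_zip, List.getElem_range]
    congr 1
    have h1 : (a ++ List.replicate (max a.length b.length - a.length) (0 : Int))[i]'hlen1
        = if i < a.length then a.getD i 0 else 0 := by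
      by_cases hia : i < a.length
      · rw [List.getElem_append_left hia, if_pos hia]
        simp [List.getD, List.getElem?_eq_getElem hia]
      · rw [List.getElem_append_right (by omega), if_neg hia, List.getElem_replicate]
    have h2 : (b ++ List.replicate (max a.length b.length - b.length) (0 : Int))[i]'hlen2
        = if i < b.length then b.getD i 0 else 0 := by
      by_cases hib : i < b.length
      · rw [List.getElem_append_left hib, if_pos hib]
        simp [List.getD, List.getElem?_eq_getElem hib]
      · rw [List.getElem_append_right (by omega), if_neg hib, List.getElem_replicate]
    rw [h1, h2]

-- B's countdown loop appends the entries for indices i-1, i-2, …, 0 after out.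
theorem pv_rev_loop (a b : List Int) (m : Int) :
    ∀ (i : Nat) (out : List Int),
      polySubModRev a b m i out
        = out ++ (List.range i).reverse.map (fun i =>
            PySem.Int.mod
              ((if i < a.length then a.getD i 0 else 0)
                - (if i < b.length then b.getD i 0 else 0)) m) := by
  intro i
  induction i with
  | zero => intro out; simp [polySubModRev]
  | succ i ih =>
    intro out
    rw [polySubModRev, ih, List.range_succ]
    simp

-- B equals the index-map normal form.
theorem pv_B_eq_idx (a b : List Int) (m : Int) :
    poly_sub_mod_alt a b m = pvIdxExpr a b m := by
  unfold poly_sub_mod_alt pvIdxExpr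
  rw [pv_rev_loop]
  simp [List.map_reverse]

-- ===== VERDICT (by name: the statement is the Claim_ definition above) =====
theorem poly_sub_mod_spec : Claim_equal_poly_sub_mod := by
  intro a b m _ _
  unfold Spec_poly_sub_mod
  rw [pv_A_eq_pad, pv_pad_eq_idx, pv_B_eq_idx]
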